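-- pv_equiv track=rewrite | github.com/stache-ai/stache-ai | packages/stache-ai/src/stache_ai/chunking/recursive.py | find_best_boundary
-- ===== SOURCE A (Python) =====
-- def find_best_boundary(text: str, position: int, search_range: int = 200) -> int:
--     """
--     Find the best boundary (paragraph, sentence, or word) near a position.
--
--     Searches backward from position to find, in order of preference:
--     1. Paragraph break (double newline)
--     2. Sentence end (. ! ? followed by space/newline)
--     3. Word boundary (space)
--
--     Args:
--         text: The text to search in
--         position: Starting position (approximate boundary)
--         search_range: How far back to search for a good boundary
--
--     Returns:
--         Position of the best boundary found
--     """
--     if position <= 0: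
--         return 0
--     if position >= len(text):
--         return len(text)
--
--     search_start = max(0, position - search_range)
--     search_text = text[search_start:position]
--
--     # Try to find paragraph break (double newline)
--     para_break = search_text.rfind('\n\n')
--     if para_break != -1:
--         return search_start + para_break + 2  # After the double newline
--
--     # Try to find sentence end (. ! ? followed by space or newline)
--     best_sentence = -1
--     for i in range(len(search_text) - 1, 0, -1):
--         if search_text[i - 1] in '.!?' and search_text[i] in ' \n':
--             best_sentence = i
--             break
--     if best_sentence != -1:
--         return search_start + best_sentence + 1  # After the space/newline
--
--     # Fall back to word boundary
--     space_pos = search_text.rfind(' ')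
--     if space_pos != -1:
--         return search_start + space_pos + 1  # After the space
--
--     newline_pos = search_text.rfind('\n')
--     if newline_pos != -1:
--         return search_start + newline_pos + 1  # After the newline
--
--     # No good boundary found, return original position
--     return position
-- ===== SOURCE B (Python) =====
-- def find_best_boundary(text: str, position: int, search_range: int = 200) -> int:
--     """Single backward pass over the window: returns immediately on a paragraph
--     break, otherwise records the first (rightmost) sentence-end, space and
--     newline seen and picks by priority at the end -- instead of four staged
--     scans."""
--     if position <= 0:
--         return 0
--     n = len(text)
--     if position >= n:
--         return n
--     search_start = max(0, position - search_range)
--     w = text[search_start:position]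
--     sent = space = nl = None
--     for i in range(len(w) - 1, -1, -1):
--         c = w[i]
--         if c == '\n':
--             if i + 1 < len(w) and w[i + 1] == '\n':
--                 return search_start + i + 2  # paragraph break wins immediately
--             if nl is None:
--                 nl = i
--             if sent is None and i >= 1 and w[i - 1] in '.!?':
--                 sent = i
--         elif c == ' ':
--             if space is None:
--                 space = i
--             if sent is None and i >= 1 and w[i - 1] in '.!?':
--                 sent = i
--     if sent is not None:
--         return search_start + sent + 1
--     if space is not None:
--         return search_start + space + 1
--     if nl is not None:
--         return search_start + nl + 1
--     return position
-- ===== Notes on version B (the rewrite author's own statement) =====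
-- stated objective: alternative
-- what changed: Replaces A's four staged scans of the window (rfind for the paragraph break, a manual backward loop for sentence ends, rfind for space, rfind for newline) by a single backward pass that early-exits on a paragraph break and accumulates the rightmost sentence/space/newline hits, picking by priority at the end.
import Mathlib
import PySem

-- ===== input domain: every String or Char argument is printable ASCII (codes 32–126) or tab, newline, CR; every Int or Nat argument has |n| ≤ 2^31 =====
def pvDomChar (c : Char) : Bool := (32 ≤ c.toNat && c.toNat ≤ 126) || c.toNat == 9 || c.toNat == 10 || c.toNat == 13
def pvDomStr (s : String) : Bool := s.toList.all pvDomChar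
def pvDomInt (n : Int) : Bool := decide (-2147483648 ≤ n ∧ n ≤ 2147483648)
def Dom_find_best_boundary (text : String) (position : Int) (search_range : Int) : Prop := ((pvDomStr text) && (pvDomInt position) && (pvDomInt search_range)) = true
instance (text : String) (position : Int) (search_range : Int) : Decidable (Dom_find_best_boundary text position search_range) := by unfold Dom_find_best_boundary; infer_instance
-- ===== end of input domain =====

-- B replaces A's four staged scans (rfind for paragraph, a manual backward sentence
-- loop, rfind for space, rfind for newline) by ONE backward pass that early-exits on a
-- paragraph break and accumulates the rightmost sentence/space/newline hits;
-- objective: alternative decomposition, same cost.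


-- ===== PORT A =====
-- A's manual backward loop `for i in range(len(search_text)-1, 0, -1)` with early break:
-- indices are always in range, so `w[i]?.any` tests exactly Python's `search_text[i] in '...'`.
def sentLoop (w : List Char) : Nat → Int
  | 0 => -1
  | (i+1) =>
      if (w[i]?.any (fun c => ['.', '!', '?'].contains c))
          && (w[(i+1)]?.any (fun c => [' ', '\n'].contains c)) then ((i : Int) + 1)
      else sentLoop w i

def find_best_boundary (text : String) (position : Int) (search_range : Int) : Int :=
  let n : Int := (text.toList.length : Int)
  if position ≤ 0 then 0
  else if position ≥ n then n
  else
    let search_start := max 0 (position - search_range)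
    let w := PySem.List.slice text.toList (some search_start) (some position)
    let para_break := PySem.Chars.rfind w ['\n', '\n']
    if para_break ≠ -1 then search_start + para_break + 2
    else
      let best_sentence := sentLoop w (w.length - 1)
      if best_sentence ≠ -1 then search_start + best_sentence + 1
      else
        let space_pos := PySem.Chars.rfind w [' ']
        if space_pos ≠ -1 then search_start + space_pos + 1
        else
          let newline_pos := PySem.Chars.rfind w ['\n']
          if newline_pos ≠ -1 then search_start + newline_pos + 1
          else position

-- ===== PORT B =====
-- the priority pick at the end of Source B's loop (sent > space > nl > position)
def bFinish (ss pos : Int) (sent space nl : Option Int) : Int :=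
  match sent with
  | some s => ss + s + 1
  | none =>
    match space with
    | some s => ss + s + 1
    | none =>
      match nl with
      | some s => ss + s + 1
      | none => pos

-- Source B's `for i in range(len(w)-1, -1, -1)` single backward pass: fuel k means
-- indices k-1 … 0 remain to scan; early return on a paragraph break.
def bScan (ss pos : Int) (w : List Char) : Option Int → Option Int → Option Int → Nat → Int
  | sent, space, nl, 0 => bFinish ss pos sent space nl
  | sent, space, nl, k+1 =>
    if w[k]? = some '\n' then
      if w[k+1]? = some '\n' then ss + (k : Int) + 2
      else
        let nl' := if nl = none then some (k : Int) else nl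
        let sent' := if sent = none ∧ 1 ≤ k ∧ (w[k-1]?.any (fun c => ['.', '!', '?'].contains c))
                     then some (k : Int) else sent
        bScan ss pos w sent' space nl' k
    else if w[k]? = some ' ' then
      let space' := if space = none then some (k : Int) else space
      let sent' := if sent = none ∧ 1 ≤ k ∧ (w[k-1]?.any (fun c => ['.', '!', '?'].contains c))
                   then some (k : Int) else sent
      bScan ss pos w sent' space' nl k
    else bScan ss pos w sent space nl k

def find_best_boundary_alt (text : String) (position : Int) (search_range : Int) : Int :=
  let n : Int := (text.toList.length : Int)
  if position ≤ 0 then 0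
  else if position ≥ n then n
  else
    let search_start := max 0 (position - search_range)
    let w := PySem.List.slice text.toList (some search_start) (some position)
    bScan search_start position w none none none w.length

-- ===== PRECONDITION & SPEC =====
def Spec_find_best_boundary (text : String) (position : Int) (search_range : Int) (out : Int) : Prop := out = find_best_boundary_alt text position search_range
instance (text : String) (position : Int) (search_range : Int) (out : Int) : Decidable (Spec_find_best_boundary text position search_range out) := by unfold Spec_find_best_boundary; infer_instance

-- ===== CLAIM =====
def Claim_equal_find_best_boundary : Prop := ∀ (text : String) (position : Int) (search_range : Int), Dom_find_best_boundary text position search_range → Spec_find_best_boundary text position search_range (find_best_boundary text position search_range)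

-- ===== LEMMAS AND PROOFS =====

-- rightmost index i < k with p i, used only in the proofs
def hitO (p : Nat → Bool) : Nat → Option Int
  | 0 => none
  | k+1 => if p k then some (k : Int) else hitO p k

def toI (o : Option Int) : Int := o.getD (-1)

def oor (a b : Option Int) : Option Int := match a with | some x => some x | none => b

theorem oor_none (a : Option Int) : oor a none = a := by cases a <;> rfl

def paraP (w : List Char) (i : Nat) : Bool := (w[i]? = some '\n') && (w[i+1]? = some '\n')
def sentP (w : List Char) (i : Nat) : Bool :=
  decide (1 ≤ i) && (w[i-1]?.any (fun c => ['.', '!', '?'].contains c))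
    && (w[i]?.any (fun c => [' ', '\n'].contains c))
def spaceP (w : List Char) (i : Nat) : Bool := w[i]? = some ' '
def nlP (w : List Char) (i : Nat) : Bool := w[i]? = some '\n'

theorem hitO_congr (p q : Nat → Bool) (h : ∀ i, p i = q i) (k : Nat) : hitO p k = hitO q k := by
  induction k with
  | zero => rfl
  | succ k ih => simp [hitO, h k, ih]

theorem hitO_shape (p : Nat → Bool) (k : Nat) :
    hitO p k = none ∨ ∃ m : Nat, hitO p k = some (m : Int) := by
  induction k with
  | zero => exact Or.inl rfl
  | succ k ih =>
    rw [hitO]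
    split
    · exact Or.inr ⟨k, rfl⟩
    · exact ih

-- rfind is already a backward scan: go w p k = rightmost i ≤ k where p is a prefix
theorem go_eq_hitO (w p : List Char) (k : Nat) :
    PySem.Chars.rfind.go w p k = toI (hitO (fun i => p.isPrefixOf (w.drop i)) (k+1)) := by
  induction k with
  | zero =>
    rw [PySem.Chars.rfind.go, hitO]
    split <;> simp_all [hitO, toI]
  | succ k ih =>
    rw [PySem.Chars.rfind.go, hitO]
    split
    · simp_all [toI]
    · simp_all

theorem rfind_eq_hitO (w p : List Char) (hp : p ≠ []) :
    PySem.Chars.rfind w p = toI (hitO (fun i => p.isPrefixOf (w.drop i)) w.length) := by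
  rw [PySem.Chars.rfind, go_eq_hitO]
  have hfalse : (p.isPrefixOf (w.drop w.length)) = false := by
    rcases p with _ | ⟨a, t⟩
    · exact absurd rfl hp
    · simp
  rw [hitO, hfalse]
  simp

theorem prefix_single (w : List Char) (c : Char) (i : Nat) :
    ([c].isPrefixOf (w.drop i)) = decide (w[i]? = some c) := by
  have h0 : w[i]? = (w.drop i)[0]? := by simp
  rw [h0]
  rcases w.drop i with _ | ⟨a, t⟩
  · simp [List.isPrefixOf]
  · by_cases ha : a = c <;> simp [List.isPrefixOf, ha, Ne.symm]

theorem prefix_para (w : List Char) (i : Nat) :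
    (['\n', '\n'].isPrefixOf (w.drop i)) = paraP w i := by
  have h0 : w[i]? = (w.drop i)[0]? := by simp
  have h1 : w[i+1]? = (w.drop i)[1]? := by rw [List.getElem?_drop]
  rw [paraP, h0, h1]
  rcases w.drop i with _ | ⟨a, _ | ⟨b, t⟩⟩
  · simp [List.isPrefixOf]
  · simp [List.isPrefixOf]
  · by_cases ha : a = '\n' <;> by_cases hb : b = '\n' <;>
      simp [List.isPrefixOf, ha, hb, Ne.symm]

-- A's manual sentence loop is the rightmost sentP hit
theorem sentLoop_eq_hitO (w : List Char) (m : Nat) :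
    sentLoop w m = toI (hitO (sentP w) (m+1)) := by
  induction m with
  | zero => simp [sentLoop, hitO, sentP, toI]
  | succ m ih =>
    rw [sentLoop, hitO]
    have hs : sentP w (m+1)
        = ((w[m]?.any (fun c => ['.', '!', '?'].contains c))
            && (w[m+1]?.any (fun c => [' ', '\n'].contains c))) := by
      simp [sentP]
    rw [hs]
    split
    · simp [toI]
    · exact ih

theorem sentLoop_top (w : List Char) :
    sentLoop w (w.length - 1) = toI (hitO (sentP w) w.length) := by
  rcases hn : w.length with _ | m
  · simp [sentLoop, hitO, toI]
  · rw [Nat.add_sub_cancel]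
    exact sentLoop_eq_hitO w m

-- one-step accumulator updates of the single pass
theorem sent_update (w : List Char) (k : Nat) (sent : Option Int)
    (hk : sentP w k = (decide (1 ≤ k) && (w[k-1]?.any (fun c => ['.', '!', '?'].contains c)))) :
    oor (if sent = none ∧ 1 ≤ k ∧ (w[k-1]?.any (fun c => ['.', '!', '?'].contains c))
         then some (k : Int) else sent) (hitO (sentP w) k)
      = oor sent (hitO (sentP w) (k+1)) := by
  rcases sent with _ | s
  · by_cases h1 : 1 ≤ k
    · by_cases h2 : (w[k-1]?.any (fun c => ['.', '!', '?'].contains c)) = true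
      · have hs : sentP w k = true := by rw [hk, h2]; simp [h1]
        rw [if_pos ⟨rfl, h1, h2⟩, hitO, hs]
        simp [oor]
      · have hs : sentP w k = false := by rw [hk, eq_false_of_ne_true h2]; simp
        rw [if_neg (by tauto), hitO, hs]
        simp [oor]
    · have hs : sentP w k = false := by
        rw [hk, show decide (1 ≤ k) = false by simp [h1]]
        simp
      rw [if_neg (by tauto), hitO, hs]
      simp [oor]
  · rw [if_neg (by simp), hitO]
    split <;> simp [oor]

theorem first_update (x : Option Int) (p : Nat → Bool) (k : Nat) (hp : p k = true) :
    oor (if x = none then some (k : Int) else x) (hitO p k) = oor x (hitO p (k+1)) := by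
  rw [hitO, hp]
  rcases x with _ | v <;> simp [oor]

theorem skip_update (x : Option Int) (p : Nat → Bool) (k : Nat) (hp : p k = false) :
    oor x (hitO p k) = oor x (hitO p (k+1)) := by
  rw [hitO, hp]
  simp

-- the single-pass invariant: fuel k scans indices < k; accumulators hold the hits at indices ≥ k
theorem bScan_inv (ss pos : Int) (w : List Char) (k : Nat) :
    ∀ sent space nl, bScan ss pos w sent space nl k =
      match hitO (paraP w) k with
      | some p => ss + p + 2
      | none => bFinish ss pos (oor sent (hitO (sentP w) k))
                  (oor space (hitO (spaceP w) k)) (oor nl (hitO (nlP w) k)) := by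
  induction k with
  | zero => intro sent space nl; simp [bScan, hitO, oor_none]
  | succ k ih =>
    intro sent space nl
    rw [bScan]
    by_cases hnl : w[k]? = some '\n'
    · rw [if_pos hnl]
      by_cases hnl2 : w[k+1]? = some '\n'
      · rw [if_pos hnl2]
        have hp : paraP w k = true := by simp [paraP, hnl, hnl2]
        simp [hitO, hp]
      · rw [if_neg hnl2]
        have hp : paraP w k = false := by simp [paraP, hnl, hnl2]
        rw [ih, show hitO (paraP w) (k+1) = hitO (paraP w) k by simp [hitO, hp]]
        rcases hpk : hitO (paraP w) k with _ | p
        · simp only []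
          rw [sent_update w k sent (by simp [sentP, hnl]),
              skip_update space (spaceP w) k (by simp [spaceP, hnl]),
              first_update nl (nlP w) k (by simp [nlP, hnl])]
        · simp
    · rw [if_neg hnl]
      by_cases hspc : w[k]? = some ' '
      · rw [if_pos hspc]
        have hp : paraP w k = false := by simp [paraP, hnl]
        rw [ih, show hitO (paraP w) (k+1) = hitO (paraP w) k by simp [hitO, hp]]
        rcases hpk : hitO (paraP w) k with _ | p
        · simp only []
          rw [sent_update w k sent (by simp [sentP, hspc]),
              first_update space (spaceP w) k (by simp [spaceP, hspc]),
              skip_update nl (nlP w) k (by simp [nlP, hnl])]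
        · simp
      · rw [if_neg hspc]
        have hp : paraP w k = false := by simp [paraP, hnl]
        have hsent : sentP w k = false := by
          rcases hc : w[k]? with _ | c
          · simp [sentP, hc]
          · have hc1 : c ≠ ' ' := by rintro rfl; exact hspc hc
            have hc2 : c ≠ '\n' := by rintro rfl; exact hnl hc
            simp [sentP, hc, hc1, hc2]
        rw [ih, show hitO (paraP w) (k+1) = hitO (paraP w) k by simp [hitO, hp]]
        rcases hpk : hitO (paraP w) k with _ | p
        · simp only []
          rw [skip_update sent (sentP w) k hsent,
              skip_update space (spaceP w) k (by simp [spaceP, hspc]),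
              skip_update nl (nlP w) k (by simp [nlP, hnl])]
        · simp

-- A's staged cascade equals the single pass, on any window
theorem chain_eq (ss pos : Int) (w : List Char) :
    (if PySem.Chars.rfind w ['\n', '\n'] ≠ -1 then ss + PySem.Chars.rfind w ['\n', '\n'] + 2
     else if sentLoop w (w.length - 1) ≠ -1 then ss + sentLoop w (w.length - 1) + 1
     else if PySem.Chars.rfind w [' '] ≠ -1 then ss + PySem.Chars.rfind w [' '] + 1
     else if PySem.Chars.rfind w ['\n'] ≠ -1 then ss + PySem.Chars.rfind w ['\n'] + 1
     else pos)
    = bScan ss pos w none none none w.length := by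
  rw [bScan_inv]
  rw [rfind_eq_hitO w ['\n', '\n'] (by simp), hitO_congr (fun i => ['\n', '\n'].isPrefixOf (w.drop i)) (paraP w) (prefix_para w) w.length]
  rw [rfind_eq_hitO w [' '] (by simp),
      hitO_congr (fun i => [' '].isPrefixOf (w.drop i)) (spaceP w) (by intro i; simp only [spaceP]; exact prefix_single w ' ' i) w.length]
  rw [rfind_eq_hitO w ['\n'] (by simp),
      hitO_congr (fun i => ['\n'].isPrefixOf (w.drop i)) (nlP w) (by intro i; simp only [nlP]; exact prefix_single w '\n' i) w.length]
  rw [sentLoop_top]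
  have hsent := hitO_shape (sentP w) w.length
  have hsp := hitO_shape (spaceP w) w.length
  have hn := hitO_shape (nlP w) w.length
  rcases hitO_shape (paraP w) w.length with h1 | ⟨p, h1⟩ <;> rw [h1]
  · simp only [toI, Option.getD_none, oor, bFinish]
    rw [if_neg (by omega)]
    rcases hsent with h2 | ⟨s, h2⟩ <;> rw [h2] <;>
      simp only [Option.getD_none, Option.getD_some]
    · rw [if_neg (by omega)]
      rcases hsp with h3 | ⟨sp, h3⟩ <;> rw [h3] <;>
        simp only [Option.getD_none, Option.getD_some]
      · rw [if_neg (by omega)]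
        rcases hn with h4 | ⟨nn, h4⟩ <;> rw [h4] <;>
          simp only [Option.getD_none, Option.getD_some]
        · rw [if_neg (by omega)]
        · rw [if_pos (by omega)]
      · rw [if_pos (by omega)]
    · rw [if_pos (by omega)]
  · simp only [toI, Option.getD_some]
    rw [if_pos (by omega)]

-- ===== VERDICT =====
theorem find_best_boundary_spec : Claim_equal_find_best_boundary := by
  intro text position search_range _
  unfold Spec_find_best_boundary
  show find_best_boundary text position search_range
      = find_best_boundary_alt text position search_range
  simp only [find_best_boundary, find_best_boundary_alt]
  split
  · rfl
  · split
    · rfl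
    · exact chain_eq _ position _
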